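-- pv_equiv track=rewrite | github.com/JuanIgnacioOchoa/Practice_Algorythms | Google/Kickstart2021/Round_A/L_Shaped_Plots/main.py | getnumberOfL
-- ===== SOURCE A (Python) =====
-- def getnumberOfL(sizes):
--     x0 = sizes[0]
--     x1 = sizes[1]
--     ans = 0
--     while x1 >= 2:
--         if (x1*2) <= x0:
--             ans += 1
--         x1-=1
--     x1 = sizes[1]
--     while x0 >= 2:
--         if (x0*2) <= x1:
--             ans+=1
--         x0-=1
--     return ans
-- ===== SOURCE B (Python) =====
-- def getnumberOfL(sizes):
--     a = sizes[0]
--     b = sizes[1]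
--     return max(0, min(b, a // 2) - 1) + max(0, min(a, b // 2) - 1)
-- ===== Notes on version B (the rewrite author's own statement) =====
-- stated objective: faster
-- what changed: Replaced the two count-down loops by a closed-form count: the integers t in [2, b] with 2t <= a number max(0, min(b, a//2) - 1), summed for both directions.
-- outside the precondition, e.g. on getnumberOfL([0]): A raises IndexError, B raises IndexError; on getnumberOfL([1]): A raises IndexError, B raises IndexError
import Mathlib
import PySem

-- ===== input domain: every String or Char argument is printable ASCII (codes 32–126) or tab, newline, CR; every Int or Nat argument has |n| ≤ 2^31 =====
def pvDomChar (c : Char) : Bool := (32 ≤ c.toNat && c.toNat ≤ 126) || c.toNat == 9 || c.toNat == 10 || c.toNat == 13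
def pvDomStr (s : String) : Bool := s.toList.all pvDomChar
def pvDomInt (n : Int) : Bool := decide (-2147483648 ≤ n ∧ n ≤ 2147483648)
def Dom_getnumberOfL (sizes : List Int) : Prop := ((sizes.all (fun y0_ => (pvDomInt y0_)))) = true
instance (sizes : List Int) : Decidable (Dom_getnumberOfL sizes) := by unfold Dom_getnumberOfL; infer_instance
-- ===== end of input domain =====

-- ===== PORT A =====
-- B is a closed-form O(1) count; A loops down from each value. Both raise IndexError
-- when len(sizes) < 2, excluded by Pre_.

-- 'while x1 >= 2: if 2*x1 <= x0: ans += 1; x1 -= 1'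
def pvLoopA (x0 x1 ans : Int) : Int :=
  if x1 ≥ 2 then
    pvLoopA x0 (x1 - 1) (ans + (if x1 * 2 ≤ x0 then 1 else 0))
  else ans
termination_by (x1 - 1).toNat
decreasing_by omega

def getnumberOfL (sizes : List Int) : Int :=
  let x0 := (PySem.List.pyGet? sizes 0).getD 0   -- Pre_ guarantees the index is in range
  let x1 := (PySem.List.pyGet? sizes 1).getD 0
  let ans := pvLoopA x0 x1 0
  pvLoopA x1 x0 ans

-- ===== PORT B =====
def getnumberOfL_alt (sizes : List Int) : Int :=
  let a := (PySem.List.pyGet? sizes 0).getD 0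
  let b := (PySem.List.pyGet? sizes 1).getD 0
  max 0 (min b (PySem.Int.floordiv a 2) - 1) + max 0 (min a (PySem.Int.floordiv b 2) - 1)

-- ===== PRECONDITION & SPEC =====
-- A (and B) index sizes[0] and sizes[1]: fewer than two elements raises IndexError.
def Pre_getnumberOfL (sizes : List Int) : Prop := 2 ≤ sizes.length
instance (sizes : List Int) : Decidable (Pre_getnumberOfL sizes) := by unfold Pre_getnumberOfL; infer_instance
def pvWitness_getnumberOfL : List Int := [7, 3]

def Spec_getnumberOfL (sizes : List Int) (out : Int) : Prop := out = getnumberOfL_alt sizes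
instance (sizes : List Int) (out : Int) : Decidable (Spec_getnumberOfL sizes out) := by unfold Spec_getnumberOfL; infer_instance

-- ===== CLAIM (what is proved, stated in full; the proofs are below) =====
def Claim_equal_getnumberOfL : Prop := ∀ (sizes : List Int), Dom_getnumberOfL sizes → Pre_getnumberOfL sizes → Spec_getnumberOfL sizes (getnumberOfL sizes)

-- ===== LEMMAS AND PROOFS =====

-- The loop counts the integers t with 2 ≤ t ≤ b and 2*t ≤ a, i.e. max 0 (min b (a // 2) - 1).
theorem pvLoopA_closed (a b ans : Int) :
    pvLoopA a b ans = ans + max 0 (min b (PySem.Int.floordiv a 2) - 1) := by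
  have hfd : PySem.Int.floordiv a 2 = a / 2 := PySem.Int.floordiv_eq_ediv_of_pos (by omega)
  rw [hfd]
  induction hn : b.toNat using Nat.strong_induction_on generalizing b ans with
  | _ n ih =>
    rw [pvLoopA]
    by_cases hb : b ≥ 2
    · simp only [hb, if_true]
      rw [ih (b - 1).toNat (by omega) (b - 1) _ rfl]
      split_ifs <;> omega
    · simp only [hb, if_false]
      omega

theorem getnumberOfL_spec : Claim_equal_getnumberOfL := by
  intro sizes _ _
  unfold Spec_getnumberOfL getnumberOfL getnumberOfL_alt
  simp only [pvLoopA_closed]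
  omega
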